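-- pv_equiv track=rewrite | github.com/cjcolman/advent_of_code | 2025/Connor/1/secret_entrance.py | get_password_2
-- ===== SOURCE A (Python) =====
-- def get_password_2(instructions_list):
--     current_position = 50
--     current_password = 0
--     for instruction in instructions_list:
--         rotation_remaining = instruction
--         while rotation_remaining != 0:
--             step = 1 if rotation_remaining > 0 else -1
--             current_position = (current_position + step) % 100
--             rotation_remaining -= step
--             if current_position == 0:
--                 current_password += 1
--     return current_password
-- ===== SOURCE B (Python) =====
-- def get_password_2(instructions_list):
--     position = 50
--     password = 0
--     for n in instructions_list:
--         if n > 0: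
--             password += (position + n) // 100
--         elif n < 0:
--             password += (position - 1) // 100 - (position + n - 1) // 100
--         position = (position + n) % 100
--     return password
-- ===== Notes on version B (the rewrite author's own statement) =====
-- stated objective: faster
-- what changed: Replaces A's unit-step while loop (one modular step per click) with a per-instruction closed form: count the multiples of 100 crossed via floor division and jump the position directly with one mod.
import Mathlib
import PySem

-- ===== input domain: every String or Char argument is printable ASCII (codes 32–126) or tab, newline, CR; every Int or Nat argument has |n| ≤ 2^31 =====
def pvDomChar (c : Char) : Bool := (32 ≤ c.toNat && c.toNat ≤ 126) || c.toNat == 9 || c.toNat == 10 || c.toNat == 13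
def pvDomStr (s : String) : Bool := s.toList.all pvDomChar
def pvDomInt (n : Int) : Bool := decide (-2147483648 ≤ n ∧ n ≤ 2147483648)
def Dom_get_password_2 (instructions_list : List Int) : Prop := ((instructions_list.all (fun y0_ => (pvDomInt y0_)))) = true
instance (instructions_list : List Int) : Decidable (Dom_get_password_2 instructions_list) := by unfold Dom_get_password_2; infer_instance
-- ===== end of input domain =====

-- B replaces A's step-by-step while loop by a per-instruction closed form (floor-division
-- count of multiples of 100 crossed), O(n) instead of O(sum |instruction|).

-- ===== PORT A =====
-- A's inner while loop: state (current_position, current_password), steps by ±1 until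
-- rotation_remaining is 0; recursion on |rotation_remaining|.
def pvInnerA (pos cnt r : Int) : Int × Int :=
  if _h : r = 0 then (pos, cnt)
  else
    let step : Int := if r > 0 then 1 else -1
    let pos' := PySem.Int.mod (pos + step) 100
    let cnt' := if pos' = 0 then cnt + 1 else cnt
    pvInnerA pos' cnt' (r - step)
termination_by r.natAbs
decreasing_by split <;> omega

def get_password_2 (instructions_list : List Int) : Int :=
  (instructions_list.foldl (fun st instruction => pvInnerA st.1 st.2 instruction) (50, 0)).2

-- ===== PORT B =====
def get_password_2_alt (instructions_list : List Int) : Int :=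
  (instructions_list.foldl
    (fun st n =>
      let pos := st.1
      let pw :=
        if n > 0 then st.2 + PySem.Int.floordiv (pos + n) 100
        else if n < 0 then
          st.2 + (PySem.Int.floordiv (pos - 1) 100 - PySem.Int.floordiv (pos + n - 1) 100)
        else st.2
      (PySem.Int.mod (pos + n) 100, pw))
    (50, 0)).2

-- ===== PRECONDITION & SPEC =====
def Spec_get_password_2 (instructions_list : List Int) (out : Int) : Prop := out = get_password_2_alt instructions_list
instance (instructions_list : List Int) (out : Int) : Decidable (Spec_get_password_2 instructions_list out) := by unfold Spec_get_password_2; infer_instance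

-- ===== CLAIM (what is proved, stated in full; the proofs are below) =====
def Claim_equal_get_password_2 : Prop := ∀ (instructions_list : List Int), Dom_get_password_2 instructions_list → Spec_get_password_2 instructions_list (get_password_2 instructions_list)

-- ===== LEMMAS AND PROOFS =====

theorem pv_mod_bounds (x : Int) : 0 ≤ PySem.Int.mod x 100 ∧ PySem.Int.mod x 100 < 100 :=
  ⟨PySem.Int.mod_nonneg x (by norm_num), PySem.Int.mod_lt x (by norm_num)⟩

theorem pv_hmod (a : Int) : PySem.Int.mod a 100 = a % 100 :=
  PySem.Int.mod_eq_emod_of_pos (by norm_num)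

theorem pv_hfd (a : Int) : PySem.Int.floordiv a 100 = a / 100 :=
  PySem.Int.floordiv_eq_ediv_of_pos (by norm_num)

-- closed form of A's inner loop
theorem pvInnerA_closed (k : Nat) : ∀ (r pos cnt : Int), r.natAbs = k → 0 ≤ pos → pos < 100 →
    pvInnerA pos cnt r =
      (PySem.Int.mod (pos + r) 100,
       cnt + (if r > 0 then PySem.Int.floordiv (pos + r) 100
              else if r < 0 then PySem.Int.floordiv (pos - 1) 100 - PySem.Int.floordiv (pos + r - 1) 100
              else 0)) := by
  induction k using Nat.strong_induction_on with
  | _ k ih =>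
    intro r pos cnt hk h0 h100
    by_cases hr : r = 0
    · subst hr
      unfold pvInnerA
      simp only [pv_hmod]
      simp
      omega
    · unfold pvInnerA
      simp only [hr, dif_neg, not_false_iff]
      by_cases hpos : r > 0
      · simp only [hpos, if_pos]
        have hb := pv_mod_bounds (pos + 1)
        rw [ih (r - 1).natAbs (by omega) (r - 1) _ _ rfl hb.1 hb.2]
        simp only [pv_hmod, pv_hfd, Prod.mk.injEq] at *
        constructor
        · omega
        · split_ifs <;> omega
      · have hneg : r < 0 := by omega
        simp only [hpos, if_neg, not_false_iff]
        have hb := pv_mod_bounds (pos + -1)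
        have hstep : r - -1 = r + 1 := by ring
        rw [hstep, ih (r + 1).natAbs (by omega) (r + 1) _ _ rfl hb.1 hb.2]
        simp only [pv_hmod, pv_hfd, Prod.mk.injEq] at *
        constructor
        · omega
        · split_ifs <;> omega

theorem pv_fold_eq (l : List Int) : ∀ (pos cnt : Int), 0 ≤ pos → pos < 100 →
    l.foldl (fun st instruction => pvInnerA st.1 st.2 instruction) (pos, cnt) =
    l.foldl (fun st n =>
      let p := st.1
      let pw :=
        if n > 0 then st.2 + PySem.Int.floordiv (p + n) 100
        else if n < 0 then
          st.2 + (PySem.Int.floordiv (p - 1) 100 - PySem.Int.floordiv (p + n - 1) 100)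
        else st.2
      (PySem.Int.mod (p + n) 100, pw)) (pos, cnt) := by
  induction l with
  | nil => intro pos cnt _ _; rfl
  | cons n t ih =>
    intro pos cnt h0 h100
    simp only [List.foldl_cons]
    rw [pvInnerA_closed n.natAbs n pos cnt rfl h0 h100]
    have hb := pv_mod_bounds (pos + n)
    rw [ih _ _ hb.1 hb.2]
    congr 1
    simp only [Prod.mk.injEq]
    exact ⟨trivial, by split_ifs <;> ring⟩

-- ===== VERDICT (by name: the statement is the Claim_ definition above) =====
theorem get_password_2_spec : Claim_equal_get_password_2 := by
  intro l _
  unfold Spec_get_password_2 get_password_2 get_password_2_alt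
  rw [pv_fold_eq l 50 0 (by norm_num) (by norm_num)]
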